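-- pv_equiv track=rewrite | github.com/zero41120/pokemonquestcompass | includes/python/extract_from_rank.py | format_lines
-- ===== SOURCE A (Python) =====
-- def format_lines(lines):
-- 	reformatted = []
-- 	temp = ''
-- 	for i, line in enumerate(lines):
-- 		line = line.strip().replace(' ', '').replace('\t\t', '\t').replace('#','')
-- 		if i % 2 == 0:
-- 			temp = line
-- 		else:
-- 			reformatted.append(temp +'\t'+ line)
-- 	return reformatted
-- ===== SOURCE B (Python) =====
-- def _clean(s):
--     return s.strip().replace(' ', '').replace('\t\t', '\t').replace('#', '')
--
--
-- def format_lines(lines):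
--     lines = list(lines)
--     return [_clean(a) + '\t' + _clean(b)
--             for a, b in zip(lines[0::2], lines[1::2])]
-- ===== Notes on version B (the rewrite author's own statement) =====
-- stated objective: simpler
-- what changed: Replaces the parity-indexed loop threading a temp accumulator with a direct structural pairing: zip the even-index and odd-index slices and map a small cleaner over each pair.
import Mathlib
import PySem

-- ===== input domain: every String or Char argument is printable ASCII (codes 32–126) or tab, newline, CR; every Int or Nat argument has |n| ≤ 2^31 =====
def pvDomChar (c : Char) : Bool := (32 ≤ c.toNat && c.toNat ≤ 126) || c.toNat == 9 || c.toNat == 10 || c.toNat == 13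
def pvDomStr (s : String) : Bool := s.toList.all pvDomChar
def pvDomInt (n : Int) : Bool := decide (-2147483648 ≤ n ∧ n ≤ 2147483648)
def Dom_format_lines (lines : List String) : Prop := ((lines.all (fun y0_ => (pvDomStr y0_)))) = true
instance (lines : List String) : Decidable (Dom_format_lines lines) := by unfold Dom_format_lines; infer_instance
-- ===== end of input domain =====

-- B replaces the parity loop with a temp accumulator by zipping the even/odd slices and mapping a cleaner over the pairs (simpler decomposition, same cost).

-- ===== PORT A =====
def format_lines (lines : List String) : List String :=
  ((PySem.List.enumerate lines 0).foldl
    (fun (st : List String × String) (p : Int × String) =>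
      let line := PySem.Str.replace (PySem.Str.replace (PySem.Str.replace
        (PySem.Str.strip p.2) " " "") "\t\t" "\t") "#" ""
      if PySem.Int.mod p.1 2 == 0 then (st.1, line)
      else (st.1 ++ [st.2 ++ "\t" ++ line], st.2))
    (([] : List String), "")).1

-- ===== PORT B =====
def pvClean (s : String) : String :=
  PySem.Str.replace (PySem.Str.replace (PySem.Str.replace
    (PySem.Str.strip s) " " "") "\t\t" "\t") "#" ""

def format_lines_alt (lines : List String) : List String :=
  let evens := (PySem.List.slice? lines (some 0) none 2).getD []
  let odds := (PySem.List.slice? lines (some 1) none 2).getD []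
  (evens.zip odds).map (fun p => pvClean p.1 ++ "\t" ++ pvClean p.2)

-- ===== PRECONDITION & SPEC =====
def Spec_format_lines (lines : List String) (out : List String) : Prop := out = format_lines_alt lines
instance (lines : List String) (out : List String) : Decidable (Spec_format_lines lines out) := by unfold Spec_format_lines; infer_instance

-- ===== CLAIM (what is proved, stated in full; the proofs are below) =====
def Claim_equal_format_lines : Prop := ∀ (lines : List String), Dom_format_lines lines → Spec_format_lines lines (format_lines lines)

-- ===== LEMMAS AND PROOFS =====

/-- Reference form of the result: clean and tab-join consecutive pairs. -/
def pvPairs : List String → List String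
  | [] => []
  | [_] => []
  | a :: b :: rest => (pvClean a ++ "\t" ++ pvClean b) :: pvPairs rest

def pvEvens : List String → List String
  | [] => []
  | [a] => [a]
  | a :: _ :: rest => a :: pvEvens rest

def pvOdds : List String → List String
  | [] => []
  | [_] => []
  | _ :: b :: rest => b :: pvOdds rest

lemma pvEvensFM (xs : List String) :
    List.filterMap (fun k => xs[2*k]?) (List.range ((xs.length + 1) / 2)) = pvEvens xs := by
  induction xs using pvEvens.induct with
  | case1 => simp [pvEvens]
  | case2 a => simp [pvEvens]
  | case3 a b rest ih =>
    have hc : ((a :: b :: rest).length + 1) / 2 = (rest.length + 1) / 2 + 1 := by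
      simp [List.length_cons]; omega
    rw [hc, List.range_succ_eq_map, List.filterMap_cons, List.filterMap_map]
    simp only [Nat.mul_zero]
    have : ((fun k => (a :: b :: rest)[2*k]?) ∘ (· + 1)) = fun k => rest[2*k]? := by
      funext k
      simp [Function.comp, Nat.mul_add]
    rw [this, ih]
    simp [pvEvens]

lemma pvOddsFM (xs : List String) :
    List.filterMap (fun k => xs[2*k+1]?) (List.range (xs.length / 2)) = pvOdds xs := by
  induction xs using pvOdds.induct with
  | case1 => simp [pvOdds]
  | case2 a => simp [pvOdds]
  | case3 a b rest ih =>
    have hc : (a :: b :: rest).length / 2 = rest.length / 2 + 1 := by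
      simp [List.length_cons]; omega
    rw [hc, List.range_succ_eq_map, List.filterMap_cons, List.filterMap_map]
    simp only [Nat.mul_zero, Nat.zero_add]
    have : ((fun k => (a :: b :: rest)[2*k+1]?) ∘ (· + 1)) = fun k => rest[2*k+1]? := by
      funext k
      simp [Function.comp, Nat.mul_add]
    rw [this, ih]
    simp [pvOdds]

lemma pvSliceEvens (xs : List String) :
    PySem.List.slice? xs (some 0) none 2 = some (pvEvens xs) := by
  simp only [PySem.List.slice?, PySem.List.sliceIndices]
  norm_num
  have hc : (if 0 < xs.length then (((xs.length : Int) + 2 - 1) / 2).toNat else 0)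
      = (xs.length + 1) / 2 := by split_ifs <;> omega
  have hf : (fun x : Nat => xs[(2 * (x : Int)).toNat]?) = fun k => xs[2*k]? := by
    funext k; congr 1
  rw [hc, hf, pvEvensFM]

lemma pvSliceOdds (xs : List String) :
    PySem.List.slice? xs (some 1) none 2 = some (pvOdds xs) := by
  simp only [PySem.List.slice?, PySem.List.sliceIndices]
  norm_num
  cases xs with
  | nil => simp [pvOdds]
  | cons a rest =>
    have h1 : min (1 : Int) ((a :: rest).length : Int) = 1 := by
      simp only [List.length_cons]; omega
    rw [h1]
    have hc : (if 1 < (a :: rest).length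
        then ((((a :: rest).length : Int) - 1 + 2 - 1) / 2).toNat else 0)
        = (a :: rest).length / 2 := by
      simp only [List.length_cons]; split_ifs <;> omega
    have hf : (fun x : Nat => (a :: rest)[((1 : Int) + 2 * (x : Int)).toNat]?)
        = fun k => (a :: rest)[2*k+1]? := by
      funext k; congr 1; omega
    rw [hc, hf, pvOddsFM]

lemma pvZipEO (xs : List String) :
    ((pvEvens xs).zip (pvOdds xs)).map (fun p => pvClean p.1 ++ "\t" ++ pvClean p.2) = pvPairs xs := by
  induction xs using pvPairs.induct with
  | case1 => rfl
  | case2 a => rfl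
  | case3 a b rest ih => simp [pvEvens, pvOdds, pvPairs, ih]

lemma pvAltEq (lines : List String) : format_lines_alt lines = pvPairs lines := by
  unfold format_lines_alt
  rw [pvSliceEvens, pvSliceOdds]
  simpa using pvZipEO lines

lemma pvFoldA (lines : List String) : ∀ (k : Nat) (acc : List String) (temp : String),
    ((PySem.List.enumerate lines (2*(k:Int))).foldl
      (fun (st : List String × String) (p : Int × String) =>
        let line := PySem.Str.replace (PySem.Str.replace (PySem.Str.replace
          (PySem.Str.strip p.2) " " "") "		" "	") "#" ""
        if PySem.Int.mod p.1 2 == 0 then (st.1, line)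
        else (st.1 ++ [st.2 ++ "	" ++ line], st.2))
      (acc, temp)).1 = acc ++ pvPairs lines := by
  induction lines using pvPairs.induct with
  | case1 => intro k acc temp; simp [PySem.List.enumerate_nil, pvPairs]
  | case2 a =>
    intro k acc temp
    have hm : (PySem.Int.mod (2*(k:Int)) 2 == 0) = true := by
      rw [PySem.Int.mod_eq_emod_of_pos (by norm_num)]; simp
    rw [PySem.List.enumerate_cons, PySem.List.enumerate_nil]
    simp only [List.foldl_cons, List.foldl_nil, hm, if_true]
    simp [pvPairs]
  | case3 a b rest ih =>
    intro k acc temp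
    have hm : (PySem.Int.mod (2*(k:Int)) 2 == 0) = true := by
      rw [PySem.Int.mod_eq_emod_of_pos (by norm_num)]; simp
    have hm2 : (PySem.Int.mod (2*(k:Int)+1) 2 == 0) = false := by
      rw [PySem.Int.mod_eq_emod_of_pos (by norm_num)]; simp
    rw [PySem.List.enumerate_cons, PySem.List.enumerate_cons]
    have hcast : (2*(k:Int) + 1 + 1) = 2*((k+1 : Nat) : Int) := by push_cast; ring
    rw [hcast]
    simp only [List.foldl_cons, hm, hm2, if_true, Bool.false_eq_true, if_false]
    rw [ih (k+1)]
    simp [pvPairs, pvClean]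

-- ===== VERDICT (by name: the statement is the Claim_ definition above) =====
theorem format_lines_spec : Claim_equal_format_lines := by
  intro lines _
  unfold Spec_format_lines
  rw [pvAltEq]
  have h := pvFoldA lines 0 [] ""
  simp only [Nat.cast_zero, mul_zero, List.nil_append] at h
  exact h
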